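-- pv_equiv track=rewrite | github.com/anderf2706/Feederproject_KBE | Updatepoints.py | update
-- ===== SOURCE A (Python) =====
-- def update(point):
--     a= ''
--     liste = []
--     toMM = 500
--     for i in point:
--
--         if i.isdigit():
--             a+= i
--         else:
--             if len(a) > 0:
--                 liste.append(a)
--                 a=''
--
--     liste = list(map(int, liste))
--
--     finalList =[]
--
--     count= 1
--     for i in liste:
--         if count == 3:
--             count= 1
--         if count== 1:
--             a= i
--         elif count ==2:
--             b= i
--         if count== 2:
--             finalList.append((a*toMM, b*toMM))
--
--         count += 1
--
--     return finalList
-- ===== SOURCE B (Python) =====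
-- def update(point):
--     # Extract the maximal digit runs, then pair consecutive numbers and
--     # convert to millimetres.
--     tokens = ''.join(c if c.isdigit() else ' ' for c in point).split()
--     nums = [int(t) for t in tokens]
--     return [(x * 500, y * 500) for x, y in zip(nums[::2], nums[1::2])]
-- ===== Notes on version B (the rewrite author's own statement) =====
-- stated objective: idiomatic
-- what changed: Replaces the char-by-char accumulator loop and the mod-3 counter state machine by mask-nondigits-to-space + str.split() tokenization and pairing via zip of even/odd slices.
-- intended difference: On strings ending in a digit whose total number of digit runs is even, A silently drops the final digit run (its flush only fires on a following non-digit) and so loses the last coordinate pair, e.g. '1 2' -> []; B parses all runs and returns [(500, 1000)], which is the intended parse. — e.g. on update("1 2"): A returns [], B returns [(500, 1000)]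
import Mathlib
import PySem

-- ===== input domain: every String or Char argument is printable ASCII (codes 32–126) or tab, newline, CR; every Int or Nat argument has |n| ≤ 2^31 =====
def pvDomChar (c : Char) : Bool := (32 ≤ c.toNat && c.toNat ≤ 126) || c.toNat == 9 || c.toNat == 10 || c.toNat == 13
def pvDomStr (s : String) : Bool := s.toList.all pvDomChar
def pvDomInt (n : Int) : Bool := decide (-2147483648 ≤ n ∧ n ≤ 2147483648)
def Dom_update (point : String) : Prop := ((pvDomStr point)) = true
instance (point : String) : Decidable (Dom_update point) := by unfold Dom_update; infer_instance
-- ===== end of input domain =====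

-- B replaces A's char-by-char accumulator loop and mod-3 counter machine by
-- mask-to-space + split() tokenization and even/odd slice pairing (idiomatic, same cost);
-- B intentionally keeps a trailing digit run that A silently drops (see D_update).

-- ===== PORT A =====
-- body of A's first loop: accumulate digit run a (st.1), flush into liste (st.2)
def updStep1 (st : List Char × List (List Char)) (i : Char) : List Char × List (List Char) :=
  if PySem.Chars.isdigit i then (st.1 ++ [i], st.2)
  else if st.1.length > 0 then ([], st.2 ++ [st.1]) else (st.1, st.2)

-- body of A's second loop: state (count, a, b, finalList)
def updStep2 (toMM : Int) (st : Int × Int × Int × List (Int × Int)) (i : Int) :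
    Int × Int × Int × List (Int × Int) :=
  let count := if st.1 == 3 then (1 : Int) else st.1
  let a := if count == 1 then i else st.2.1
  let b := if count == 1 then st.2.2.1 else if count == 2 then i else st.2.2.1
  let finalList := if count == 2 then st.2.2.2 ++ [(a * toMM, b * toMM)] else st.2.2.2
  (count + 1, a, b, finalList)

def update (point : String) : List (Int × Int) :=
  let toMM : Int := 500
  let st1 := point.toList.foldl updStep1 ([], [])
  -- liste = list(map(int, liste)); every element is a nonempty digit run, so
  -- int() never raises and ofChars? is some here (.getD 0 is never taken)
  let liste := st1.2.map (fun s => (PySem.Int.ofChars? s).getD 0)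
  -- a and b are only read after being set (count==1 fires on the first
  -- iteration), so the initial 0s below are never read
  let st2 := liste.foldl (updStep2 toMM) (1, 0, 0, [])
  st2.2.2.2

-- ===== PORT B =====
def update_alt (point : String) : List (Int × Int) :=
  let masked := point.toList.map (fun c => if PySem.Chars.isdigit c then c else ' ')
  let tokens := PySem.Chars.split₀ masked
  -- int(t): each token is a nonempty digit run, so .getD 0 is never taken
  let nums := tokens.map (fun t => (PySem.Int.ofChars? t).getD 0)
  -- nums[::2] and nums[1::2]; slice? is none only for step 0, so .getD [] is never taken
  let evs := (PySem.List.slice? nums none none 2).getD []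
  let ods := (PySem.List.slice? nums (some 1) none 2).getD []
  (List.zip evs ods).map (fun p => (p.1 * 500, p.2 * 500))

-- ===== PRECONDITION & SPEC =====
-- On strings ending in a digit whose total number of digit runs is even (the count of
-- `true`s in the destuttered digit-mask), A silently drops the final digit run (its
-- flush only fires on a following non-digit) and loses the last coordinate pair;
-- B parses all runs, which is the intended parse.
def D_update (point : String) : Prop :=
  point.toList.getLast?.any PySem.Chars.isdigit = true ∧
  ((point.toList.map PySem.Chars.isdigit).destutter (· ≠ ·)).count true % 2 = 0
instance (point : String) : Decidable (D_update point) := by unfold D_update; infer_instance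

def Spec_update (point : String) (out : List (Int × Int)) : Prop :=
  ¬ D_update point → out = update_alt point
instance (point : String) (out : List (Int × Int)) : Decidable (Spec_update point out) := by unfold Spec_update; infer_instance

def pvDiffWitness_update : String := "1 2"
def pvDiffWitnessOut_update : (List (Int × Int)) × (List (Int × Int)) := ([], [(500, 1000)])

-- ===== CLAIM (what is proved, stated in full; the proofs are below) =====
def Claim_unchanged_update : Prop := ∀ (point : String), Dom_update point → Spec_update point (update point)
def Claim_changed_update : Prop := Dom_update (pvDiffWitness_update) ∧ D_update (pvDiffWitness_update) ∧ update (pvDiffWitness_update) = pvDiffWitnessOut_update.1 ∧ update_alt (pvDiffWitness_update) = pvDiffWitnessOut_update.2 ∧ pvDiffWitnessOut_update.1 ≠ pvDiffWitnessOut_update.2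
def Claim_exact_update : Prop := ∀ (point : String), Dom_update point → D_update point → update point ≠ update_alt point

-- ===== LEMMAS AND PROOFS =====

-- A's tokenization: digit runs flushed by a following non-digit (trailing run dropped)
def runsDrop : List Char → List Char → List (List Char)
  | _, [] => []
  | a, c :: cs =>
    if PySem.Chars.isdigit c then runsDrop (a ++ [c]) cs
    else if a.length > 0 then a :: runsDrop [] cs else runsDrop [] cs

-- all digit runs, including a trailing one
def runsAll : List Char → List Char → List (List Char)
  | a, [] => if a.isEmpty then [] else [a]
  | a, c :: cs =>
    if PySem.Chars.isdigit c then runsAll (a ++ [c]) cs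
    else if a.isEmpty then runsAll [] cs else a :: runsAll [] cs

-- whether a trailing (unterminated) run exists
def endsD (a : List Char) (cs : List Char) : Bool :=
  match cs.getLast? with
  | some c => PySem.Chars.isdigit c
  | none => !a.isEmpty

def evens : List Int → List Int
  | [] => []
  | [x] => [x]
  | x :: _ :: r => x :: evens r

def odds (l : List Int) : List Int := evens l.tail

def pairs : List Int → List (Int × Int)
  | x :: y :: r => (x * 500, y * 500) :: pairs r
  | _ => []

lemma isspace_of_isdigit (c : Char) (h : PySem.Chars.isdigit c = true) :
    PySem.Chars.isspace c = false := by
  simp only [PySem.Chars.isdigit, Bool.and_eq_true, decide_eq_true_eq, Char.le_def] at h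
  simp only [PySem.Chars.isspace, Bool.or_eq_false_iff, Bool.and_eq_false_iff,
    decide_eq_false_iff_not]
  have h1 : 48 ≤ c.toNat := h.1
  have h2 : c.toNat ≤ 57 := h.2
  simp only [Char.toNat] at *
  omega

lemma foldl1_eq (cs : List Char) : ∀ (a : List Char) (L : List (List Char)),
    (cs.foldl updStep1 (a, L)).2 = L ++ runsDrop a cs := by
  induction cs with
  | nil => intro a L; simp [runsDrop]
  | cons c cs ih =>
    intro a L
    by_cases h : PySem.Chars.isdigit c = true
    · simp [List.foldl_cons, updStep1, h, ih, runsDrop]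
    · by_cases ha : a.length > 0
      · simp [List.foldl_cons, updStep1, h, ha, ih, runsDrop]
      · have ha0 : a = [] := by cases a with | nil => rfl | cons x xs => simp at ha
        subst ha0
        simp [List.foldl_cons, updStep1, h, ih, runsDrop]

lemma go_mask (cs : List Char) : ∀ (cur : List Char) (acc : List (List Char)),
    PySem.Chars.split₀.go (cs.map (fun c => if PySem.Chars.isdigit c then c else ' ')) cur acc
      = acc.reverse ++ runsAll cur.reverse cs := by
  induction cs with
  | nil =>
    intro cur acc
    rw [PySem.Chars.split₀.go.eq_def]
    by_cases h : cur.isEmpty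
    · simp [h, runsAll]
    · simp [h, runsAll]
  | cons c cs ih =>
    intro cur acc
    by_cases h : PySem.Chars.isdigit c = true
    · have hs := isspace_of_isdigit c h
      simp only [List.map_cons, h, if_pos]
      rw [PySem.Chars.split₀.go.eq_def]
      simp only [hs, Bool.false_eq_true, ite_false]
      rw [ih]
      simp [runsAll, h]
    · have hs : PySem.Chars.isspace ' ' = true := by decide
      simp only [List.map_cons, h, Bool.false_eq_true, ite_false]
      rw [PySem.Chars.split₀.go.eq_def]
      simp only [hs, if_pos]
      by_cases hc : cur.isEmpty
      · have hc0 : cur = [] := by cases cur <;> simp_all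
        subst hc0
        simp only [List.isEmpty_nil, ite_true]
        rw [ih]
        simp [runsAll, h]
      · simp only [hc, Bool.false_eq_true, ite_false]
        rw [ih]
        have hc' : cur.reverse.isEmpty = false := by cases cur <;> simp_all
        simp [runsAll, h, hc']

lemma runsAll_ne_nil : ∀ (cs a : List Char), endsD a cs = true → runsAll a cs ≠ [] := by
  intro cs
  induction cs with
  | nil =>
    intro a h
    simp only [endsD, List.getLast?_nil] at h
    have : a.isEmpty = false := by cases a <;> simp_all
    simp [runsAll, this]
  | cons c cs ih =>
    intro a h
    by_cases hd : PySem.Chars.isdigit c = true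
    · have h' : endsD (a ++ [c]) cs = true := by
        cases cs with
        | nil => simp [endsD]
        | cons d t => simpa [endsD, List.getLast?_cons_cons] using h
      simp only [runsAll, hd, if_pos]
      exact ih _ h'
    · by_cases ha : a.isEmpty
      · have h' : endsD ([] : List Char) cs = true := by
          cases cs with
          | nil => simp [endsD, hd] at h ⊢
          | cons d t => simpa [endsD, List.getLast?_cons_cons] using h
        simp only [runsAll, hd, Bool.false_eq_true, ite_false, ha, if_pos]
        exact ih _ h'
      · simp [runsAll, hd, ha]

lemma runsDrop_eq : ∀ (cs a : List Char),
    runsDrop a cs = if endsD a cs then (runsAll a cs).dropLast else runsAll a cs := by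
  intro cs
  induction cs with
  | nil =>
    intro a
    by_cases ha : a.isEmpty
    · have ha0 : a = [] := by cases a <;> simp_all
      subst ha0; simp [runsDrop, runsAll, endsD]
    · simp [runsDrop, runsAll, endsD, ha]
  | cons c cs ih =>
    intro a
    by_cases hd : PySem.Chars.isdigit c = true
    · have he : endsD a (c :: cs) = endsD (a ++ [c]) cs := by
        cases cs with
        | nil => simp [endsD, hd]
        | cons d t =>
          have hg := List.getLast?_eq_some_getLast (l := d :: t) (by simp)
          simp only [endsD, List.getLast?_cons_cons, hg]
      simp only [runsDrop, runsAll, hd, if_pos, he]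
      exact ih (a ++ [c])
    · have he : endsD a (c :: cs) = endsD ([] : List Char) cs := by
        cases cs with
        | nil => simp [endsD, hd]
        | cons d t =>
          have hg := List.getLast?_eq_some_getLast (l := d :: t) (by simp)
          simp only [endsD, List.getLast?_cons_cons, hg]
      by_cases ha : a.isEmpty
      · have ha0 : a = [] := by cases a <;> simp_all
        subst ha0
        simp only [runsDrop, runsAll, hd, Bool.false_eq_true, ite_false, List.length_nil,
          gt_iff_lt, lt_self_iff_false, List.isEmpty_nil, ite_true, he]
        exact ih []
      · have ha' : a.length > 0 := by cases a <;> simp_all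
        simp only [runsDrop, runsAll, hd, Bool.false_eq_true, ite_false, ha', if_pos, ha, he]
        rw [ih []]
        by_cases hE : endsD ([] : List Char) cs = true
        · have hne := runsAll_ne_nil cs [] hE
          simp [hE, List.dropLast_cons_of_ne_nil hne]
        · simp only [Bool.not_eq_true] at hE
          simp [hE]

-- counts the runs of `true` in a boolean mask, given whether one is already open
def bRuns : List Bool → Bool → Nat
  | [], _ => 0
  | b :: l, prev => (if b && !prev then 1 else 0) + bRuns l b

lemma destutter'_count : ∀ (l : List Bool) (a : Bool),
    ((List.destutter' (· ≠ ·) a l).count true) = (if a then 1 else 0) + bRuns l a := by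
  intro l
  induction l with
  | nil => intro a; cases a <;> simp [List.destutter', bRuns]
  | cons b l ih =>
    intro a
    by_cases hab : a = b
    · subst hab
      simp [List.destutter', ih, bRuns]
    · have : (a ≠ b) := hab
      cases a <;> cases b <;> simp_all [List.destutter', bRuns] <;> omega

lemma destutter_count (l : List Bool) :
    ((l.destutter (· ≠ ·)).count true) = bRuns l false := by
  cases l with
  | nil => simp [List.destutter, bRuns]
  | cons b l =>
    simp only [List.destutter, destutter'_count, bRuns]
    cases b <;> simp

lemma runsAll_length : ∀ (cs a : List Char),
    (runsAll a cs).length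
      = bRuns (cs.map PySem.Chars.isdigit) (!a.isEmpty) + (if a.isEmpty then 0 else 1) := by
  intro cs
  induction cs with
  | nil =>
    intro a
    by_cases ha : a.isEmpty <;> simp [runsAll, bRuns, ha]
  | cons c cs ih =>
    intro a
    by_cases hd : PySem.Chars.isdigit c = true
    · have h1 := ih (a ++ [c])
      have h2 : (a ++ [c]).isEmpty = false := by simp
      simp only [runsAll, hd, if_pos, h1, h2, List.map_cons, bRuns]
      by_cases ha : a.isEmpty
      · simp [ha]
        omega
      · simp [ha]
    · by_cases ha : a.isEmpty
      · simp [runsAll, hd, ha, bRuns, ih []]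
      · simp [runsAll, hd, ha, bRuns, ih []]

lemma fm_evens : ∀ (l : List Int),
    (List.range ((l.length + 1) / 2)).filterMap (fun k => l[2 * k]?) = evens l := by
  intro l
  induction l using evens.induct with
  | case1 => simp [evens]
  | case2 x => simp [evens, List.range_succ]
  | case3 x y r ih =>
    have hlen : ((x :: y :: r).length + 1) / 2 = (r.length + 1) / 2 + 1 := by
      simp only [List.length_cons]; omega
    rw [hlen, List.range_succ_eq_map]
    simp only [List.filterMap_cons, List.filterMap_map]
    have h0 : (x :: y :: r)[2 * 0]? = some x := by simp
    rw [h0]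
    have hstep : ∀ k : ℕ, (x :: y :: r)[2 * Nat.succ k]? = r[2 * k]? := by
      intro k
      have : 2 * Nat.succ k = (2 * k) + 1 + 1 := by omega
      rw [this]
      simp
    simp only [Function.comp_def, hstep]
    rw [ih, evens]

lemma slice_evens (l : List Int) : PySem.List.slice? l none none 2 = some (evens l) := by
  simp only [PySem.List.slice?, PySem.List.sliceIndices]
  norm_num
  rw [← fm_evens l]
  have hc : (if 0 < l.length then (((l.length : Int) + 2 - 1) / 2).toNat else 0)
      = (l.length + 1) / 2 := by
    split_ifs with h <;> omega
  rw [hc]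
  have harg : ∀ k : ℕ, ((2 * (k : Int))).toNat = 2 * k := by intro k; omega
  simp only [harg]

lemma fm_odds : ∀ (l : List Int),
    (List.range (l.length / 2)).filterMap (fun k => l[2 * k + 1]?) = odds l := by
  intro l
  induction l using evens.induct with
  | case1 => simp [odds, evens]
  | case2 x => simp [odds, evens]
  | case3 x y r ih =>
    have hlen : (x :: y :: r).length / 2 = r.length / 2 + 1 := by
      simp only [List.length_cons]; omega
    rw [hlen, List.range_succ_eq_map]
    simp only [List.filterMap_cons, List.filterMap_map]
    have h0 : (x :: y :: r)[2 * 0 + 1]? = some y := by simp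
    rw [h0]
    have hstep : ∀ k : ℕ, (x :: y :: r)[2 * Nat.succ k + 1]? = r[2 * k + 1]? := by
      intro k
      have : 2 * Nat.succ k + 1 = (2 * k + 1) + 1 + 1 := by omega
      rw [this]
      simp
    simp only [Function.comp_def, hstep]
    rw [ih]
    simp only [odds, List.tail_cons]
    cases r with
    | nil => simp [evens]
    | cons z t => simp [evens]

lemma slice_odds (l : List Int) : PySem.List.slice? l (some 1) none 2 = some (odds l) := by
  simp only [PySem.List.slice?, PySem.List.sliceIndices]
  norm_num
  cases l with
  | nil => simp [odds, evens]
  | cons x t =>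
    rw [← fm_odds (x :: t)]
    have hmin : min (1 : Int) (((x :: t).length : Int)) = 1 := by
      simp only [List.length_cons]; push_cast; omega
    rw [hmin]
    have hc : (if 1 < (x :: t).length then ((((x :: t).length : Int) - 1 + 2 - 1) / 2).toNat else 0)
        = (x :: t).length / 2 := by
      split_ifs with h <;> simp only [List.length_cons] at * <;> omega
    rw [hc]
    have harg : ∀ k : ℕ, ((1 + 2 * (k : Int))).toNat = 2 * k + 1 := by intro k; omega
    simp only [harg]

lemma zip_pairs : ∀ (l : List Int),
    (List.zip (evens l) (odds l)).map (fun p => (p.1 * 500, p.2 * 500)) = pairs l := by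
  intro l
  induction l using evens.induct with
  | case1 => simp [evens, odds, pairs]
  | case2 x => simp [evens, odds, pairs]
  | case3 x y r ih =>
    have he : evens (x :: y :: r) = x :: evens r := by simp [evens]
    have ho : odds (x :: y :: r) = y :: odds r := by
      simp only [odds, List.tail_cons]
      cases r with
      | nil => simp [evens]
      | cons z t => simp [evens]
    rw [he, ho]
    simp only [odds] at ih
    simp only [List.zip_cons_cons, List.map_cons, odds, ih, pairs]

lemma foldl2_eq : ∀ (l : List Int) (c a b : Int) (fin : List (Int × Int)),
    (c = 1 ∨ c = 3) →
    (l.foldl (updStep2 500) (c, a, b, fin)).2.2.2 = fin ++ pairs l := by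
  intro l
  induction l using evens.induct with
  | case1 => intro c a b fin hc; simp [pairs]
  | case2 x =>
    intro c a b fin hc
    have h1 : updStep2 500 (c, a, b, fin) x = (2, x, b, fin) := by
      rcases hc with rfl | rfl <;> norm_num [updStep2]
    simp only [List.foldl_cons, List.foldl_nil, h1]
    simp [pairs]
  | case3 x y r ih =>
    intro c a b fin hc
    have h1 : updStep2 500 (c, a, b, fin) x = (2, x, b, fin) := by
      rcases hc with rfl | rfl <;> norm_num [updStep2]
    have h2 : updStep2 500 (2, x, b, fin) y = (3, x, y, fin ++ [(x * 500, y * 500)]) := by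
      norm_num [updStep2]
    simp only [List.foldl_cons, h1, h2]
    rw [ih 3 x y _ (Or.inr rfl)]
    simp [pairs]

lemma pairs_length : ∀ (l : List Int), (pairs l).length = l.length / 2 := by
  intro l
  induction l using evens.induct with
  | case1 => simp [pairs]
  | case2 x => simp [pairs]
  | case3 x y r ih => simp only [pairs, List.length_cons, ih]; omega

lemma pairs_dropLast_of_odd (l : List Int) (h : l.length % 2 = 1) :
    pairs l.dropLast = pairs l := by
  induction l using evens.induct with
  | case1 => simp at h
  | case2 x => simp [pairs]
  | case3 x y r ih =>
    have hr : r.length % 2 = 1 := by simp only [List.length_cons] at h; omega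
    have hrne : r ≠ [] := by intro h0; subst h0; simp at hr
    have : (x :: y :: r).dropLast = x :: y :: r.dropLast := by
      rw [List.dropLast_cons_of_ne_nil (by simp), List.dropLast_cons_of_ne_nil hrne]
    rw [this]
    simp only [pairs, ih hr]

-- both ports reduced to `pairs` over the run lists
lemma update_eq_pairs (point : String) :
    update point = pairs ((runsDrop [] point.toList).map (fun s => (PySem.Int.ofChars? s).getD 0)) := by
  unfold update
  dsimp only
  rw [foldl1_eq, foldl2_eq _ 1 0 0 [] (Or.inl rfl)]
  simp

lemma update_alt_eq_pairs (point : String) :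
    update_alt point = pairs ((runsAll [] point.toList).map (fun s => (PySem.Int.ofChars? s).getD 0)) := by
  unfold update_alt
  dsimp only
  simp only [PySem.Chars.split₀]
  rw [go_mask]
  simp only [List.reverse_nil, List.nil_append]
  rw [slice_evens, slice_odds]
  simp only [Option.getD_some]
  rw [zip_pairs]

-- ===== VERDICT (by name: the statement is the Claim_ definition above) =====
theorem update_spec : Claim_unchanged_update := by
  intro point _ hnd
  rw [update_eq_pairs, update_alt_eq_pairs, runsDrop_eq]
  by_cases hE : endsD [] point.toList = true
  · have hlast : point.toList.getLast?.any PySem.Chars.isdigit = true := by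
      cases h : point.toList.getLast? with
      | none => simp [endsD, h] at hE
      | some c => simpa [endsD, h] using hE
    have hodd : bRuns (point.toList.map PySem.Chars.isdigit) false % 2 = 1 := by
      by_contra h2
      exact hnd ⟨hlast, by rw [destutter_count]; omega⟩
    have hlen : (runsAll [] point.toList).length % 2 = 1 := by
      simpa [runsAll_length point.toList []] using hodd
    simp only [hE, if_pos]
    rw [List.map_dropLast]
    rw [pairs_dropLast_of_odd _ (by simpa using hlen)]
  · simp only [Bool.not_eq_true] at hE
    simp [hE]

theorem update_changed : Claim_changed_update := by
  unfold Claim_changed_update; decide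

theorem update_tight : Claim_exact_update := by
  intro point _ hd
  obtain ⟨hlast, heven⟩ := hd
  have hE : endsD [] point.toList = true := by
    cases h : point.toList.getLast? with
    | none => simp [h] at hlast
    | some c => simpa [endsD, h] using hlast
  have hne := runsAll_ne_nil point.toList [] hE
  have hlen : (runsAll [] point.toList).length % 2 = 0 := by
    rw [destutter_count] at heven
    simpa [runsAll_length point.toList []] using heven
  have hpos : 0 < (runsAll [] point.toList).length := List.length_pos_of_ne_nil hne
  rw [update_eq_pairs, update_alt_eq_pairs, runsDrop_eq]
  simp only [hE, if_pos]
  intro hcontra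
  have h1 := congrArg List.length hcontra
  simp only [pairs_length, List.length_map, List.length_dropLast] at h1
  omega
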